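-- pv_equiv track=rewrite | github.com/minhdamienpham/CNIT390SeniorProject | nodered_algorithm.py | calculate_level
-- ===== SOURCE A (Python) =====
-- def calculate_level(moisture_value):
--   level = []
--   for value in moisture_value:
--     if value > 395:
--       level.append(3)
--     elif value > 370:
--       level.append(2)
--     elif value > 355:
--       level.append(1)
--     else:
--       level.append(0)
--   return level
-- ===== SOURCE B (Python) =====
-- import bisect
--
-- THRESHOLDS = [355, 370, 395]
--
-- def calculate_level(moisture_value):
--   return [bisect.bisect_left(THRESHOLDS, value) for value in moisture_value]
-- ===== Notes on version B (the rewrite author's own statement) =====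
-- stated objective: idiomatic
-- what changed: Replaced the if/elif cascade with a sorted threshold table classified via bisect.bisect_left (binary search), built with a list comprehension instead of an accumulator loop.
import Mathlib
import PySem

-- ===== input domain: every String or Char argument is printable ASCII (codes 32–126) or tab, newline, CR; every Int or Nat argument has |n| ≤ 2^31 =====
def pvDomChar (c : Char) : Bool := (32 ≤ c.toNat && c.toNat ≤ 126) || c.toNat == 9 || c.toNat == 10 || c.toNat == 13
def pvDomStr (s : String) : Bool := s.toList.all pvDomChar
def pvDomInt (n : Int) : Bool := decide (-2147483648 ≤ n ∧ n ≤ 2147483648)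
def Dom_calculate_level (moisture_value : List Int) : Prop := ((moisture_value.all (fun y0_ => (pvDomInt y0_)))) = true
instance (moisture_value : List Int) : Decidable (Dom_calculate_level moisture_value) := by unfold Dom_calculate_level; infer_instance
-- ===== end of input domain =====

-- B replaces A's if/elif cascade with a sorted threshold table looked up by binary search
-- (bisect_left), built with a list comprehension (idiomatic; same exact values).

-- ===== PORT A =====
def calculate_level (moisture_value : List Int) : List Int :=
  moisture_value.foldl (fun level value =>
    if value > 395 then level ++ [3]
    else if value > 370 then level ++ [2]
    else if value > 355 then level ++ [1]
    else level ++ [0]) []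

-- ===== PORT B =====
def pvThresholds : List Int := [355, 370, 395]

-- literal port of bisect.bisect_left(a, x) with lo=0, hi=len(a)
def pvBisectLeft (a : List Int) (x : Int) (lo hi : Nat) : Nat :=
  if lo < hi then
    let mid := (lo + hi) / 2
    if a.getD mid 0 < x then pvBisectLeft a x (mid + 1) hi
    else pvBisectLeft a x lo mid
  else lo
termination_by hi - lo

def calculate_level_alt (moisture_value : List Int) : List Int :=
  moisture_value.map (fun value => (pvBisectLeft pvThresholds value 0 pvThresholds.length : Int))

-- ===== PRECONDITION & SPEC =====
def Spec_calculate_level (moisture_value : List Int) (out : List Int) : Prop := out = calculate_level_alt moisture_value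
instance (moisture_value : List Int) (out : List Int) : Decidable (Spec_calculate_level moisture_value out) := by unfold Spec_calculate_level; infer_instance

-- ===== CLAIM (what is proved, stated in full; the proofs are below) =====
def Claim_equal_calculate_level : Prop := ∀ (moisture_value : List Int), Dom_calculate_level moisture_value → Spec_calculate_level moisture_value (calculate_level moisture_value)

-- ===== LEMMAS AND PROOFS =====

-- pointwise: binary search over the fixed table equals A's cascade
theorem pvBisect_eq_cascade (v : Int) :
    ((pvBisectLeft pvThresholds v 0 pvThresholds.length : Nat) : Int)
      = if v > 395 then 3 else if v > 370 then 2 else if v > 355 then 1 else 0 := by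
  show ((pvBisectLeft pvThresholds v 0 3 : Nat) : Int) = _
  unfold pvBisectLeft
  simp only [pvThresholds]
  by_cases h3 : v > 395 <;> by_cases h2 : v > 370 <;> by_cases h1 : v > 355 <;>
    unfold pvBisectLeft <;> unfold pvBisectLeft <;> unfold pvBisectLeft <;>
    simp_all <;> omega

theorem foldl_append_map {α β : Type} (f : α → β) :
    ∀ (l : List α) (acc : List β),
      l.foldl (fun acc v => acc ++ [f v]) acc = acc ++ l.map f := by
  intro l
  induction l with
  | nil => simp
  | cons x xs ih => intro acc; simp [List.foldl, ih]

-- ===== VERDICT (by name: the statement is the Claim_ definition above) =====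
theorem calculate_level_spec : Claim_equal_calculate_level := by
  intro m _
  show calculate_level m = calculate_level_alt m
  unfold calculate_level calculate_level_alt
  have h : ∀ v : Int,
      (fun (level : List Int) (value : Int) =>
        if value > 395 then level ++ [3]
        else if value > 370 then level ++ [2]
        else if value > 355 then level ++ [1]
        else level ++ [0]) = fun level value => level ++ [if value > 395 then 3 else if value > 370 then 2 else if value > 355 then 1 else 0] := by
    intro v; funext level value; split_ifs <;> rfl
  rw [h 0, foldl_append_map]
  simp [pvBisect_eq_cascade]
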